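-- pv_equiv track=rewrite | github.com/gatocor/treeclust | treeclust/plotting/multiresolution_graph.py | _calculate_total_crossings
-- ===== SOURCE A (Python) =====
-- from typing import Optional, Tuple, Union, Dict, List, Any
--
-- def _count_crossings_for_pair(node_order: List, idx1: int, idx2: int,
--                              prev_nodes: List, edge_dict: Dict, positions: Dict) -> int:
--     """
--     Count crossings caused by edges from two specific nodes.
--     """
--
--     node1 = node_order[idx1]
--     node2 = node_order[idx2]
--
--     crossings = 0
--
--     # Get connections for both nodes
--     connections1 = []
--     connections2 = []
--
--     if node1 in edge_dict:
--         for connected_node, weight in edge_dict[node1]: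
--             if connected_node in prev_nodes and connected_node in positions:
--                 connections1.append(positions[connected_node][0])
--
--     if node2 in edge_dict:
--         for connected_node, weight in edge_dict[node2]:
--             if connected_node in prev_nodes and connected_node in positions:
--                 connections2.append(positions[connected_node][0])
--
--     # Count crossings between edges from node1 and node2
--     for pos1 in connections1:
--         for pos2 in connections2:
--             # Check if edges cross (considering node1 is to the left of node2)
--             if idx1 < idx2 and pos1 > pos2:  # node1 left, but connects to right
--                 crossings += 1
--             elif idx1 > idx2 and pos1 < pos2:  # node1 right, but connects to left
--                 crossings += 1
--
--     return crossings
--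
-- def _calculate_total_crossings(node_order: List, prev_nodes: List,
--                               edge_dict: Dict, positions: Dict) -> int:
--     """
--     Calculate total number of edge crossings for a given node ordering.
--     """
--
--     total_crossings = 0
--
--     # Check all pairs of nodes in current level
--     for i in range(len(node_order)):
--         for j in range(i + 1, len(node_order)):
--             crossings = _count_crossings_for_pair(
--                 node_order, i, j, prev_nodes, edge_dict, positions
--             )
--             total_crossings += crossings
--
--     return total_crossings
-- ===== SOURCE B (Python) =====
-- from bisect import bisect_right, insort
--
--
-- def _calculate_total_crossings(node_order, prev_nodes, edge_dict, positions):
--     """Left-to-right sweep: keep a sorted list of connection positions of the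
--     nodes already placed; for each new node's connection position p, the edges
--     it crosses are exactly the earlier positions greater than p (counted with
--     one binary search), then merge the node's positions into the sorted list."""
--     prev_set = set(prev_nodes)
--     total = 0
--     seen = []  # sorted connection positions of nodes to the left
--     for node in node_order:
--         conns = [positions[c][0] for c, _w in edge_dict.get(node, [])
--                  if c in prev_set and c in positions]
--         for p in conns:
--             total += len(seen) - bisect_right(seen, p)
--         for p in conns:
--             insort(seen, p)
--     return total
-- ===== Notes on version B (the rewrite author's own statement) =====
-- stated objective: faster
-- what changed: Replaces the all-pairs-of-nodes double loop (which rebuilds both connection lists and scans prev_nodes for every pair) with a single left-to-right sweep that computes each node's connection positions once and counts crossings against a sorted list of earlier positions via binary search (bisect_right) plus insort.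
import Mathlib
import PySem

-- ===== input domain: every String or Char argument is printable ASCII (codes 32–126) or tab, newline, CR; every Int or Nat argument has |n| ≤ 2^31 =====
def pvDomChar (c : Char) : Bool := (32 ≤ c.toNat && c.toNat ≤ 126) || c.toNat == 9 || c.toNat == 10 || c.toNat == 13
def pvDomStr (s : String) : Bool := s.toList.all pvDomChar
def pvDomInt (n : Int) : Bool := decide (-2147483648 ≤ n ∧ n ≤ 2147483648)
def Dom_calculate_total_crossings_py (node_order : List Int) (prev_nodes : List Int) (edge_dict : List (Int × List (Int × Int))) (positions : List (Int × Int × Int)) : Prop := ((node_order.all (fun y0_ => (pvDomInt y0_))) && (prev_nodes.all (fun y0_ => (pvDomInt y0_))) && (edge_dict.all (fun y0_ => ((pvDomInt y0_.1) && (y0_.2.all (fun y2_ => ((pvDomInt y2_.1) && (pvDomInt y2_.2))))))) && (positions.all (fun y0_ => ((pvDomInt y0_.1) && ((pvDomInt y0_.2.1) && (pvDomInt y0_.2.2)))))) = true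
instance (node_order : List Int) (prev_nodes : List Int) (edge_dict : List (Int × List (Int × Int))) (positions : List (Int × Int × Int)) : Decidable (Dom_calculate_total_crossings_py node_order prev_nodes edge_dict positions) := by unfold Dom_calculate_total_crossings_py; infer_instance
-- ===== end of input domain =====

-- B replaces A's all-pairs double loop (rebuilding connection lists per pair) by a single
-- left-to-right sweep counting crossings against a sorted list of earlier positions via
-- binary search (bisect_right/insort); objective: faster.


-- ===== PORT A =====
-- connections1/connections2 of _count_crossings_for_pair: positions[c][0] for the connected
-- nodes c of `node` that are in prev_nodes and in positions (append loop, as in A)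
def pvConnections (node : Int) (prev_nodes : List Int)
    (edge_dict : List (Int × List (Int × Int))) (positions : List (Int × Int × Int)) : List Int :=
  match PySem.Dict.get? (PySem.Dict.mk edge_dict) node with
  | none => []
  | some lst =>
    lst.foldl (fun acc cw =>
      if cw.1 ∈ prev_nodes ∧ (PySem.Dict.get? (PySem.Dict.mk positions) cw.1).isSome then
        acc ++ [((PySem.Dict.get? (PySem.Dict.mk positions) cw.1).getD ((0 : Int), (0 : Int))).1]
      else acc) []

-- _count_crossings_for_pair
def countCrossingsForPair (node_order : List Int) (idx1 idx2 : Int) (prev_nodes : List Int)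
    (edge_dict : List (Int × List (Int × Int))) (positions : List (Int × Int × Int)) : Int :=
  let node1 := PySem.List.pyGetD node_order idx1 0
  let node2 := PySem.List.pyGetD node_order idx2 0
  let connections1 := pvConnections node1 prev_nodes edge_dict positions
  let connections2 := pvConnections node2 prev_nodes edge_dict positions
  connections1.foldl (fun cr pos1 =>
    connections2.foldl (fun cr pos2 =>
      if idx1 < idx2 ∧ pos1 > pos2 then cr + 1
      else if idx1 > idx2 ∧ pos1 < pos2 then cr + 1
      else cr) cr) 0

def calculate_total_crossings_py (node_order : List Int) (prev_nodes : List Int) (edge_dict : List (Int × List (Int × Int))) (positions : List (Int × Int × Int)) : Int :=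
  (PySem.List.pyRange 0 (node_order.length : Int) 1).foldl (fun total i =>
    (PySem.List.pyRange (i + 1) (node_order.length : Int) 1).foldl (fun total j =>
      total + countCrossingsForPair node_order i j prev_nodes edge_dict positions) total) 0

-- ===== PORT B =====
-- the list comprehension of Source B
def pvConnsB (node : Int) (prev_set : PySem.Set Int)
    (edge_dict : List (Int × List (Int × Int))) (positions : List (Int × Int × Int)) : List Int :=
  (((PySem.Dict.getD (PySem.Dict.mk edge_dict) node []).filter
      (fun cw => PySem.Set.contains prev_set cw.1 && (PySem.Dict.get? (PySem.Dict.mk positions) cw.1).isSome)).map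
    (fun cw => ((PySem.Dict.get? (PySem.Dict.mk positions) cw.1).getD ((0 : Int), (0 : Int))).1))

-- bisect.insort: insert x at index bisect_right(s, x)
def pvInsort (s : List Int) (x : Int) : List Int :=
  let i := PySem.List.bisectRight s x
  s.take i ++ [x] ++ s.drop i

def calculate_total_crossings_py_alt (node_order : List Int) (prev_nodes : List Int) (edge_dict : List (Int × List (Int × Int))) (positions : List (Int × Int × Int)) : Int :=
  let prev_set := PySem.Set.ofList prev_nodes
  (node_order.foldl (fun (st : Int × List Int) node =>
    let conns := pvConnsB node prev_set edge_dict positions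
    let total := conns.foldl (fun t p =>
      t + ((st.2.length : Int) - (PySem.List.bisectRight st.2 p : Int))) st.1
    let seen := conns.foldl pvInsort st.2
    (total, seen)) (0, [])).1

-- ===== PRECONDITION & SPEC =====
def Spec_calculate_total_crossings_py (node_order : List Int) (prev_nodes : List Int) (edge_dict : List (Int × List (Int × Int))) (positions : List (Int × Int × Int)) (out : Int) : Prop := out = calculate_total_crossings_py_alt node_order prev_nodes edge_dict positions
instance (node_order : List Int) (prev_nodes : List Int) (edge_dict : List (Int × List (Int × Int))) (positions : List (Int × Int × Int)) (out : Int) : Decidable (Spec_calculate_total_crossings_py node_order prev_nodes edge_dict positions out) := by unfold Spec_calculate_total_crossings_py; infer_instance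

-- ===== CLAIM (what is proved, stated in full; the proofs are below) =====
def Claim_equal_calculate_total_crossings_py : Prop := ∀ (node_order : List Int) (prev_nodes : List Int) (edge_dict : List (Int × List (Int × Int))) (positions : List (Int × Int × Int)), Dom_calculate_total_crossings_py node_order prev_nodes edge_dict positions → Spec_calculate_total_crossings_py node_order prev_nodes edge_dict positions (calculate_total_crossings_py node_order prev_nodes edge_dict positions)

-- ===== LEMMAS AND PROOFS =====

-- crossings contributed by a left-side position list l against a right-side list r
def crossOut (l r : List Int) : Int :=
  (l.map (fun p => (r.countP (fun q => q < p) : Int))).sum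

-- reference sweep: process nodes left to right, acc = connection positions of nodes already placed
def specGo (prev_nodes : List Int) (edge_dict : List (Int × List (Int × Int)))
    (positions : List (Int × Int × Int)) (acc : List Int) : List Int → Int
  | [] => 0
  | n :: ns =>
      crossOut acc (pvConnections n prev_nodes edge_dict positions) +
        specGo prev_nodes edge_dict positions
          (acc ++ pvConnections n prev_nodes edge_dict positions) ns

-- A's per-pair total written as a sum over index pairs
def ASum (node_order prev_nodes : List Int)
    (edge_dict : List (Int × List (Int × Int))) (positions : List (Int × Int × Int)) : Int :=
  ((PySem.List.pyRange 0 (node_order.length : Int) 1).map (fun i =>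
    ((PySem.List.pyRange (i + 1) (node_order.length : Int) 1).map (fun j =>
      countCrossingsForPair node_order i j prev_nodes edge_dict positions)).sum)).sum


theorem crossOut_swap (l r : List Int) :
    crossOut l r = (r.map (fun q => (l.countP (fun p => q < p) : Int))).sum := by
  induction l with
  | nil => simp [crossOut]
  | cons x l ih =>
      simp only [crossOut, List.map_cons, List.sum_cons] at *
      rw [ih]
      have : ∀ q : Int, ((List.countP (fun p => decide (q < p)) (x :: l) : Int))
          = (if decide (q < x) = true then (1:Int) else 0) + (List.countP (fun p => decide (q < p)) l : Int) := by
        intro q; rw [List.countP_cons]; push_cast; split <;> omega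
      calc (r.countP (fun q => decide (q < x)) : Int) + (r.map (fun q => (l.countP (fun p => decide (q < p)) : Int))).sum
          = (r.map (fun q => (if decide (q < x) = true then (1:Int) else 0))).sum + (r.map (fun q => (l.countP (fun p => decide (q < p)) : Int))).sum := by
            rw [PySem.List.sum_map_ite_one_zero]
        _ = _ := by rw [← PySem.List.sum_map_add_int]; exact congrArg List.sum (List.map_congr_left (fun q _ => (this q).symm))

theorem crossOut_perm_left {l l' : List Int} (h : l.Perm l') (r : List Int) :
    crossOut l r = crossOut l' r := by
  unfold crossOut
  exact List.Perm.sum_eq (h.map _)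

theorem crossOut_append_left (l₁ l₂ r : List Int) :
    crossOut (l₁ ++ l₂) r = crossOut l₁ r + crossOut l₂ r := by
  simp [crossOut]

theorem crossOut_flatMap (f : Int → List Int) (ns : List Int) (r : List Int) :
    crossOut (ns.flatMap f) r = (ns.map (fun n => crossOut (f n) r)).sum := by
  induction ns with
  | nil => simp [crossOut]
  | cons n ns ih => simp only [List.flatMap_cons, crossOut_append_left, List.map_cons,
      List.sum_cons, ih]

theorem pair_eq (node_order : List Int) {i j : Int} (h : i < j) (prev_nodes : List Int)
    (edge_dict : List (Int × List (Int × Int))) (positions : List (Int × Int × Int)) :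
    countCrossingsForPair node_order i j prev_nodes edge_dict positions =
      crossOut (pvConnections (PySem.List.pyGetD node_order i 0) prev_nodes edge_dict positions)
               (pvConnections (PySem.List.pyGetD node_order j 0) prev_nodes edge_dict positions) := by
  unfold countCrossingsForPair
  simp only []
  have hinner : ∀ (l2 : List Int) (pos1 : Int) (cr : Int),
      l2.foldl (fun cr pos2 =>
        if i < j ∧ pos1 > pos2 then cr + 1
        else if i > j ∧ pos1 < pos2 then cr + 1
        else cr) cr = cr + (l2.countP (fun pos2 => decide (pos2 < pos1)) : Int) := by
    intro l2 pos1 cr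
    have : (fun (cr : Int) (pos2 : Int) =>
        if i < j ∧ pos1 > pos2 then cr + 1
        else if i > j ∧ pos1 < pos2 then cr + 1
        else cr) = fun cr pos2 => if pos2 < pos1 then cr + 1 else cr := by
      funext cr pos2
      by_cases h2 : pos2 < pos1
      · rw [if_pos ⟨h, h2⟩, if_pos h2]
      · rw [if_neg (by tauto), if_neg (by omega), if_neg h2]
    rw [this, PySem.List.foldl_ite_add_one]
  calc _ = (pvConnections (PySem.List.pyGetD node_order i 0) prev_nodes edge_dict positions).foldl
        (fun cr pos1 => cr + ((pvConnections (PySem.List.pyGetD node_order j 0) prev_nodes edge_dict positions).countP (fun pos2 => decide (pos2 < pos1)) : Int)) 0 := by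
        apply PySem.List.foldl_congr_mem
        intro cr pos1 _
        exact hinner _ pos1 cr
    _ = _ := by
        rw [PySem.List.foldl_add]
        simp [crossOut]

theorem A_eq_ASum (node_order prev_nodes : List Int)
    (edge_dict : List (Int × List (Int × Int))) (positions : List (Int × Int × Int)) :
    calculate_total_crossings_py node_order prev_nodes edge_dict positions =
      ASum node_order prev_nodes edge_dict positions := by
  unfold calculate_total_crossings_py ASum
  simp only [PySem.List.foldl_add]
  simp

theorem pyGetD_append_left (ns : List Int) (m : Int) {i : Int} (h0 : 0 ≤ i) (h : i < ns.length) :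
    PySem.List.pyGetD (ns ++ [m]) i 0 = PySem.List.pyGetD ns i 0 := by
  rw [PySem.List.pyGetD_of_nonneg _ _ h0, PySem.List.pyGetD_of_nonneg _ _ h0]
  rw [List.getD_append]
  omega

theorem pyGetD_append_length (ns : List Int) (m : Int) :
    PySem.List.pyGetD (ns ++ [m]) (ns.length : Int) 0 = m := by
  rw [PySem.List.pyGetD_of_nonneg _ _ (by positivity)]
  simp [List.getD]

theorem pair_append (ns : List Int) (m : Int) {i j : Int} (h0 : 0 ≤ i) (hi : i < ns.length)
    (hj0 : 0 ≤ j) (hj : j < ns.length) (prev_nodes : List Int)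
    (edge_dict : List (Int × List (Int × Int))) (positions : List (Int × Int × Int)) :
    countCrossingsForPair (ns ++ [m]) i j prev_nodes edge_dict positions =
      countCrossingsForPair ns i j prev_nodes edge_dict positions := by
  unfold countCrossingsForPair
  rw [pyGetD_append_left ns m h0 hi, pyGetD_append_left ns m hj0 hj]

theorem ASum_append (ns : List Int) (m : Int) (prev_nodes : List Int)
    (edge_dict : List (Int × List (Int × Int))) (positions : List (Int × Int × Int)) :
    ASum (ns ++ [m]) prev_nodes edge_dict positions =
      ASum ns prev_nodes edge_dict positions +
        crossOut (ns.flatMap (fun n => pvConnections n prev_nodes edge_dict positions))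
                 (pvConnections m prev_nodes edge_dict positions) := by
  unfold ASum
  have hlen : ((ns ++ [m]).length : Int) = (ns.length : Int) + 1 := by simp
  rw [hlen]
  rw [PySem.List.pyRange_one_succ_right (by positivity)]
  rw [List.map_append, List.sum_append]
  have hlast : ((PySem.List.pyRange ((ns.length : Int) + 1) ((ns.length : Int) + 1) 1).map (fun j =>
      countCrossingsForPair (ns ++ [m]) (ns.length : Int) j prev_nodes edge_dict positions)).sum = 0 := by
    rw [PySem.List.pyRange_one_eq_nil le_rfl]; rfl
  simp only [List.map_cons, List.map_nil, List.sum_cons, List.sum_nil, hlast]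
  -- main part: each i ∈ pyRange 0 n
  have hmain : ∀ i ∈ PySem.List.pyRange 0 (ns.length : Int) 1,
      ((PySem.List.pyRange (i + 1) ((ns.length : Int) + 1) 1).map (fun j =>
        countCrossingsForPair (ns ++ [m]) i j prev_nodes edge_dict positions)).sum =
      ((PySem.List.pyRange (i + 1) (ns.length : Int) 1).map (fun j =>
        countCrossingsForPair ns i j prev_nodes edge_dict positions)).sum +
      crossOut (pvConnections (PySem.List.pyGetD ns i 0) prev_nodes edge_dict positions)
               (pvConnections m prev_nodes edge_dict positions) := by
    intro i hi
    obtain ⟨hi0, hin⟩ := PySem.List.mem_pyRange_one.mp hi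
    rw [PySem.List.pyRange_one_succ_right (by omega)]
    rw [List.map_append, List.sum_append]
    congr 1
    · apply congrArg
      apply List.map_congr_left
      intro j hj
      obtain ⟨hj1, hjn⟩ := PySem.List.mem_pyRange_one.mp hj
      exact pair_append ns m hi0 hin (by omega) hjn prev_nodes edge_dict positions
    · simp only [List.map_cons, List.map_nil, List.sum_cons, List.sum_nil, add_zero]
      rw [pair_eq _ (by omega : i < (ns.length : Int))]
      rw [pyGetD_append_left ns m hi0 hin, pyGetD_append_length]
  rw [List.map_congr_left hmain]
  rw [PySem.List.sum_map_add_int]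
  have h2 : ((PySem.List.pyRange 0 (ns.length : Int) 1).map (fun i =>
      crossOut (pvConnections (PySem.List.pyGetD ns i 0) prev_nodes edge_dict positions)
               (pvConnections m prev_nodes edge_dict positions))).sum =
      crossOut (ns.flatMap (fun n => pvConnections n prev_nodes edge_dict positions))
               (pvConnections m prev_nodes edge_dict positions) := by
    rw [crossOut_flatMap]
    have : (PySem.List.pyRange 0 (ns.length : Int) 1).map (fun i =>
        crossOut (pvConnections (PySem.List.pyGetD ns i 0) prev_nodes edge_dict positions)
                 (pvConnections m prev_nodes edge_dict positions)) =
      ((PySem.List.pyRange 0 (ns.length : Int) 1).map (fun i => PySem.List.pyGetD ns i 0)).map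
        (fun n => crossOut (pvConnections n prev_nodes edge_dict positions)
                 (pvConnections m prev_nodes edge_dict positions)) := by
      rw [List.map_map]; rfl
    rw [this, PySem.List.map_pyGetD_pyRange_zero' ns 0]
  rw [h2]
  ring

theorem specGo_append (prev_nodes : List Int) (edge_dict : List (Int × List (Int × Int)))
    (positions : List (Int × Int × Int)) (ns : List Int) (m : Int) :
    ∀ acc, specGo prev_nodes edge_dict positions acc (ns ++ [m]) =
      specGo prev_nodes edge_dict positions acc ns +
        crossOut (acc ++ ns.flatMap (fun n => pvConnections n prev_nodes edge_dict positions))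
                 (pvConnections m prev_nodes edge_dict positions) := by
  induction ns with
  | nil => intro acc; simp [specGo]
  | cons n ns ih =>
      intro acc
      simp only [List.cons_append, specGo, ih, List.flatMap_cons, List.append_assoc]
      ring

theorem A_eq_specGo (node_order prev_nodes : List Int)
    (edge_dict : List (Int × List (Int × Int))) (positions : List (Int × Int × Int)) :
    calculate_total_crossings_py node_order prev_nodes edge_dict positions =
      specGo prev_nodes edge_dict positions [] node_order := by
  rw [A_eq_ASum]
  induction node_order using List.reverseRecOn with
  | nil => rfl
  | append_singleton ns m ih =>
      rw [ASum_append, ih, specGo_append]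
      simp

theorem bisect_count {s : List Int} (hs : s.Pairwise (· ≤ ·)) (x : Int) :
    (s.length : Int) - (PySem.List.bisectRight s x : Int) =
      (s.countP (fun p => x < p) : Int) := by
  obtain ⟨hle, hlo, hhi⟩ := PySem.List.bisectRight_spec s x hs
  set i := PySem.List.bisectRight s x with hi
  have hsplit : s = s.take i ++ s.drop i := (List.take_append_drop i s).symm
  have h1 : (s.take i).countP (fun p => decide (x < p)) = 0 := by
    rw [List.countP_eq_zero]
    intro a ha
    obtain ⟨j, hj, rfl⟩ := List.mem_iff_getElem.mp ha
    have hj' : j < i := lt_of_lt_of_le hj (by simp)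
    have hjs : j < s.length := lt_of_lt_of_le hj' hle
    have := hlo j hjs hj'
    simp [List.getElem_take]
    omega
  have h2 : (s.drop i).countP (fun p => decide (x < p)) = (s.drop i).length := by
    rw [List.countP_eq_length]
    intro a ha
    obtain ⟨j, hj, rfl⟩ := List.mem_iff_getElem.mp ha
    have hjs : i + j < s.length := by simp at hj; omega
    have := hhi (i + j) hjs (by omega)
    simp [List.getElem_drop]
    omega
  have : s.countP (fun p => decide (x < p)) = (s.drop i).length := by
    conv_lhs => rw [hsplit]
    rw [List.countP_append, h1, h2]; omega
  rw [this]
  simp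
  omega

theorem insort_perm (s : List Int) (x : Int) : (pvInsort s x).Perm (x :: s) := by
  unfold pvInsort
  have := List.perm_middle (a := x) (l₁ := s.take (PySem.List.bisectRight s x)) (l₂ := s.drop (PySem.List.bisectRight s x))
  simpa [List.take_append_drop] using this

theorem insort_sorted {s : List Int} (hs : s.Pairwise (· ≤ ·)) (x : Int) :
    (pvInsort s x).Pairwise (· ≤ ·) := by
  obtain ⟨hle, hlo, hhi⟩ := PySem.List.bisectRight_spec s x hs
  unfold pvInsort
  set i := PySem.List.bisectRight s x with hi
  have htake : ∀ a ∈ s.take i, a ≤ x := by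
    intro a ha
    obtain ⟨j, hj, rfl⟩ := List.mem_iff_getElem.mp ha
    have hj' : j < i := lt_of_lt_of_le hj (by simp)
    have hjs : j < s.length := lt_of_lt_of_le hj' hle
    have := hlo j hjs hj'
    simpa [List.getElem_take] using this
  have hdrop : ∀ a ∈ s.drop i, x ≤ a := by
    intro a ha
    obtain ⟨j, hj, rfl⟩ := List.mem_iff_getElem.mp ha
    have hjs : i + j < s.length := by simp at hj; omega
    have := hhi (i + j) hjs (by omega)
    simp only [List.getElem_drop]
    omega
  have hst : (s.take i).Pairwise (· ≤ ·) := hs.sublist (List.take_sublist i s)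
  have hsd : (s.drop i).Pairwise (· ≤ ·) := hs.sublist (List.drop_sublist i s)
  rw [List.append_assoc, List.pairwise_append]
  refine ⟨hst, ?_, ?_⟩
  · rw [List.singleton_append, List.pairwise_cons]
    exact ⟨fun a ha => hdrop a ha, hsd⟩
  · intro a ha b hb
    rcases List.mem_cons.mp (by simpa using hb) with rfl | hb'
    · exact htake a ha
    · exact le_trans (htake a ha) (hdrop b hb')

theorem foldl_append_if_prop {α β : Type} (P : α → Prop) [DecidablePred P] (f : α → β)
    (l : List α) (acc : List β) :
    l.foldl (fun a x => if P x then a ++ [f x] else a) acc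
      = acc ++ (l.filter (fun x => decide (P x))).map f := by
  induction l generalizing acc with
  | nil => simp
  | cons y l ih =>
      simp only [List.foldl_cons, List.filter_cons]
      by_cases h : P y <;> simp [h, ih, List.append_assoc]

theorem pvConnsB_eq (node : Int) (prev_nodes : List Int)
    (edge_dict : List (Int × List (Int × Int))) (positions : List (Int × Int × Int)) :
    pvConnsB node (PySem.Set.ofList prev_nodes) edge_dict positions =
      pvConnections node prev_nodes edge_dict positions := by
  unfold pvConnsB pvConnections PySem.Dict.getD
  cases h : PySem.Dict.get? (PySem.Dict.mk edge_dict) node with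
  | none => simp
  | some lst =>
      simp only [Option.getD_some]
      rw [foldl_append_if_prop]
      simp only [List.nil_append]
      congr 1
      apply List.filter_congr
      intro cw _
      have : PySem.Set.contains (PySem.Set.ofList prev_nodes) cw.1 = decide (cw.1 ∈ prev_nodes) := by
        by_cases hm : cw.1 ∈ prev_nodes
        · simp only [hm, decide_true]
          exact (PySem.Set.contains_iff _ _).mpr ((PySem.Set.mem_ofList prev_nodes cw.1).mpr hm)
        · simp only [hm, decide_false]
          exact Bool.eq_false_iff.mpr (fun hc => hm
            ((PySem.Set.mem_ofList prev_nodes cw.1).mp ((PySem.Set.contains_iff _ _).mp hc)))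
      rw [this]
      by_cases hm : cw.1 ∈ prev_nodes <;> by_cases hp : (PySem.Dict.get? (PySem.Dict.mk positions) cw.1).isSome <;> simp [hm, hp]

theorem foldl_insort_perm (conns : List Int) : ∀ s : List Int,
    (conns.foldl pvInsort s).Perm (s ++ conns) := by
  induction conns with
  | nil => intro s; simp
  | cons c cs ih =>
      intro s
      exact (ih (pvInsort s c)).trans
        (((insort_perm s c).append_right cs).trans List.perm_middle.symm)

theorem foldl_insort_sorted (conns : List Int) : ∀ {s : List Int}, s.Pairwise (· ≤ ·) →
    (conns.foldl pvInsort s).Pairwise (· ≤ ·) := by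
  induction conns with
  | nil => intro s hs; exact hs
  | cons c cs ih => intro s hs; exact ih (insort_sorted hs c)

theorem B_go (prev_nodes : List Int) (edge_dict : List (Int × List (Int × Int)))
    (positions : List (Int × Int × Int)) :
    ∀ (ns : List Int) (total : Int) (seen acc : List Int),
      seen.Perm acc → seen.Pairwise (· ≤ ·) →
      ((ns.foldl (fun (st : Int × List Int) node =>
        let conns := pvConnsB node (PySem.Set.ofList prev_nodes) edge_dict positions
        let total := conns.foldl (fun t p =>
          t + ((st.2.length : Int) - (PySem.List.bisectRight st.2 p : Int))) st.1
        let seen := conns.foldl pvInsort st.2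
        (total, seen)) (total, seen)).1)
      = total + specGo prev_nodes edge_dict positions acc ns := by
  intro ns
  induction ns with
  | nil => intro total seen acc _ _; simp [specGo]
  | cons n ns ih =>
      intro total seen acc hperm hsorted
      simp only [List.foldl_cons]
      rw [ih _ _ (acc ++ pvConnections n prev_nodes edge_dict positions)
        (by rw [pvConnsB_eq]
            exact (foldl_insort_perm _ seen).trans (hperm.append_right _)
            )
        (foldl_insort_sorted _ hsorted)]
      have hq : (pvConnsB n (PySem.Set.ofList prev_nodes) edge_dict positions).foldl
          (fun t p => t + ((seen.length : Int) - (PySem.List.bisectRight seen p : Int))) total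
          = total + crossOut acc (pvConnections n prev_nodes edge_dict positions) := by
        rw [PySem.List.foldl_add]
        congr 1
        rw [pvConnsB_eq]
        rw [crossOut_perm_left hperm.symm]
        rw [crossOut_swap]
        apply congrArg
        apply List.map_congr_left
        intro q _
        exact bisect_count hsorted q
      rw [hq]
      simp [specGo]
      ring

theorem B_eq_specGo (node_order prev_nodes : List Int)
    (edge_dict : List (Int × List (Int × Int))) (positions : List (Int × Int × Int)) :
    calculate_total_crossings_py_alt node_order prev_nodes edge_dict positions =
      specGo prev_nodes edge_dict positions [] node_order := by
  unfold calculate_total_crossings_py_alt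
  rw [B_go prev_nodes edge_dict positions node_order 0 [] [] (List.Perm.refl [])
    List.Pairwise.nil]
  ring

-- ===== VERDICT (by name: the statement is the Claim_ definition above) =====
theorem calculate_total_crossings_py_spec : Claim_equal_calculate_total_crossings_py := by
  intro no pn ed pos _
  unfold Spec_calculate_total_crossings_py
  rw [A_eq_specGo, B_eq_specGo]
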